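-- pv_equiv track=rewrite | github.com/victsilva37/soluciones-binary-bag | solucion_2.py | comun
-- ===== SOURCE A (Python) =====
-- N = 4
--
-- amistades = {(1,2), (2,3), (1,4)}
--
-- def A(i, j):
--
--     if i == j:
--         raise ValueError("Esta expresión no está permitida")
--
--     if (i, j) in amistades or (j, i) in amistades:
--         return True
--     return False
--
-- def comun(i, j):
--
--     #Lanzar error en caso de detectar valores idénticos
--     if i == j:
--         raise ValueError("Esta expresión no está permitida")
--
--     #Verificar que otra persona sea un amigo en común
--     for k in range(1, N+1):
--
--         #Saltar a la siguiente persona en caso de que los valores sean idénticos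
--         if k == i or k == j:
--             continue
--
--         #Retornar verdadero si hay un amigo en común
--         if A(i, k) and A(j, k):
--             return True
--
--     #Retornar falso en caso de no haber un amigo en común
--     return False
-- ===== SOURCE B (Python) =====
-- N = 4
--
-- amistades = {(1,2), (2,3), (1,4)}
--
-- def comun(i, j):
--     if i == j:
--         raise ValueError("Esta expresión no está permitida")
--     adj = {}
--     for a, b in amistades:
--         adj.setdefault(a, set()).add(b)
--         adj.setdefault(b, set()).add(a)
--     return bool(adj.get(i, set()) & adj.get(j, set()))
-- ===== Notes on version B (the rewrite author's own statement) =====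
-- stated objective: idiomatic
-- what changed: Replaced A's scan over range(1, N+1) with paired membership tests (via helper A) by building an adjacency dict of friend sets in one pass over amistades and returning whether the two friend sets intersect.
import Mathlib
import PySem

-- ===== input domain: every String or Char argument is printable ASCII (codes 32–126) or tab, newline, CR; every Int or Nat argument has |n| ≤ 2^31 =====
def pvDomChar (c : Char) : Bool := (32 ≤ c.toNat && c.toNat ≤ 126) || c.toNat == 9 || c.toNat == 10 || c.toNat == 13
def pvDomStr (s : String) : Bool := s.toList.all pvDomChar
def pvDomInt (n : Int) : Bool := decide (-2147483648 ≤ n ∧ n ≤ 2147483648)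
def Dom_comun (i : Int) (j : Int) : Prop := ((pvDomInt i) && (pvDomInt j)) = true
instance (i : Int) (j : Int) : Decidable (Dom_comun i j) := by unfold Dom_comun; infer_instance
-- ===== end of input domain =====

-- B replaces A's scan over range(1, N+1) with paired membership tests by a one-pass
-- adjacency table and a set intersection (objective: idiomatic).

-- module constants: N = 4, amistades = {(1,2), (2,3), (1,4)} (a set of pairs)
def pvN : Int := 4
def amistadesL : PySem.Set (Int × Int) := PySem.Set.ofList [(1,2),(2,3),(1,4)]

-- ===== PORT A =====
-- helper A(i, j): its raise path (i == j) is unreachable from comun (the loop skips k == i and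
-- k == j), so the port is the membership test alone.
def pyA (i : Int) (j : Int) : Bool :=
  PySem.Set.contains amistadesL (i, j) || PySem.Set.contains amistadesL (j, i)

-- the i == j case raises ValueError in Python: excluded by Pre_comun (value here irrelevant)
def comun (i : Int) (j : Int) : Bool :=
  if i == j then false
  else
    (PySem.List.pyRange 1 (pvN + 1) 1).any (fun k =>
      if k == i || k == j then false
      else pyA i k && pyA j k)

-- ===== PORT B =====
-- adjacency dict built once from amistades (the lookups / intersection emptiness below are
-- independent of the set's iteration order, so a fixed traversal order is exact)
def adjDict : PySem.Dict Int (PySem.Set Int) :=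
  amistadesL.foldl (fun d p =>
    let d1 := d.insert p.1 (PySem.Set.add (d.getD p.1 PySem.Set.empty) p.2)
    d1.insert p.2 (PySem.Set.add (d1.getD p.2 PySem.Set.empty) p.1)) PySem.Dict.empty

-- the i == j case raises ValueError in Python: excluded by Pre_comun (value here irrelevant)
def comun_alt (i : Int) (j : Int) : Bool :=
  if i == j then false
  else !(PySem.Set.inter (adjDict.getD i PySem.Set.empty) (adjDict.getD j PySem.Set.empty)).isEmpty

-- ===== PRECONDITION & SPEC =====
-- Pre_ excludes exactly i = j, on which the Python A raises ValueError
def Pre_comun (i : Int) (j : Int) : Prop := i ≠ j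
instance (i : Int) (j : Int) : Decidable (Pre_comun i j) := by unfold Pre_comun; infer_instance
def pvWitness_comun : Int × Int := (1, 3)

def Spec_comun (i : Int) (j : Int) (out : Bool) : Prop := out = comun_alt i j
instance (i : Int) (j : Int) (out : Bool) : Decidable (Spec_comun i j out) := by unfold Spec_comun; infer_instance

-- ===== CLAIM (what is proved, stated in full; the proofs are below) =====
def Claim_equal_comun : Prop := ∀ (i : Int) (j : Int), Dom_comun i j → Pre_comun i j → Spec_comun i j (comun i j)

-- ===== LEMMAS AND PROOFS =====

lemma pyRange_eval : PySem.List.pyRange 1 (pvN + 1) 1 = [1,2,3,4] := by decide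

-- a node outside {1,2,3,4} occurs in no friendship pair
lemma pyA_left_out (i k : Int) (h1 : i ≠ 1) (h2 : i ≠ 2) (h3 : i ≠ 3) (h4 : i ≠ 4) :
    pyA i k = false := by
  simp [pyA, amistadesL, PySem.Set.contains, PySem.Set.ofList, Prod.ext_iff]
  omega

lemma comun_out (i j : Int) (h1 : i ≠ 1) (h2 : i ≠ 2) (h3 : i ≠ 3) (h4 : i ≠ 4) :
    comun i j = false := by
  simp [comun, pyRange_eval, pyA_left_out, h1, h2, h3, h4]

lemma comun_out_right (i j : Int) (h1 : j ≠ 1) (h2 : j ≠ 2) (h3 : j ≠ 3) (h4 : j ≠ 4) :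
    comun i j = false := by
  simp [comun, pyRange_eval, pyA_left_out, h1, h2, h3, h4]

-- a node outside {1,2,3,4} is not a key of the adjacency dict
lemma getD_out (x : Int) (h1 : x ≠ 1) (h2 : x ≠ 2) (h3 : x ≠ 3) (h4 : x ≠ 4) :
    adjDict.getD x PySem.Set.empty = [] := by
  show (PySem.Dict.mk [((1:Int),([2,4]:PySem.Set Int)),(2,[1,3]),(3,[2]),(4,[1])]).getD x
      PySem.Set.empty = []
  simp only [PySem.Dict.getD, PySem.Dict.get?_mk_cons, beq_iff_eq]
  split_ifs <;> simp_all [PySem.Dict.get?]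

lemma inter_right_nil (s : PySem.Set Int) : PySem.Set.inter s [] = [] := by
  simp [PySem.Set.inter]

lemma comun_alt_out_left (i j : Int) (h1 : i ≠ 1) (h2 : i ≠ 2) (h3 : i ≠ 3) (h4 : i ≠ 4) :
    comun_alt i j = false := by
  unfold comun_alt
  rw [getD_out i h1 h2 h3 h4]
  simp [PySem.Set.inter]

lemma comun_alt_out_right (i j : Int) (h1 : j ≠ 1) (h2 : j ≠ 2) (h3 : j ≠ 3) (h4 : j ≠ 4) :
    comun_alt i j = false := by
  unfold comun_alt
  rw [getD_out j h1 h2 h3 h4, inter_right_nil]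
  simp

-- ===== VERDICT (by name: the statement is the Claim_ definition above) =====
theorem comun_spec : Claim_equal_comun := by
  intro i j _ hne
  unfold Spec_comun
  have hi : i = 1 ∨ i = 2 ∨ i = 3 ∨ i = 4 ∨ (i ≠ 1 ∧ i ≠ 2 ∧ i ≠ 3 ∧ i ≠ 4) := by omega
  have hj : j = 1 ∨ j = 2 ∨ j = 3 ∨ j = 4 ∨ (j ≠ 1 ∧ j ≠ 2 ∧ j ≠ 3 ∧ j ≠ 4) := by omega
  rcases hi with rfl|rfl|rfl|rfl|⟨a1,a2,a3,a4⟩ <;>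
    rcases hj with rfl|rfl|rfl|rfl|⟨b1,b2,b3,b4⟩ <;>
    first
      | omega
      | decide
      | simp_all [comun_out, comun_alt_out_left, comun_out_right, comun_alt_out_right]
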